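-- pv_equiv track=rewrite | github.com/SupaKicka/Sinonimizzatore-2 | scrape_wiktionary.py | normalize_reflexive
-- ===== SOURCE A (Python) =====
-- def normalize_reflexive(word):
--     """Normalizza verbi riflessivi: 'addolorarsi' → 'addolorare', 'perdersi' → 'perdere'.
--     Ritorna la forma base se è un riflessivo, altrimenti la parola originale."""
--     w = word.lower()
--     # -arsi → -are, -ersi → -ere, -irsi → -ire
--     for refl, base in [("arsi", "are"), ("ersi", "ere"), ("irsi", "ire"),
--                         ("arci", "are"), ("arvi", "are"), ("armi", "are"), ("arti", "are"),
--                         ("erci", "ere"), ("ervi", "ere"), ("ermi", "ere"), ("erti", "ere"),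
--                         ("irci", "ire"), ("irvi", "ire"), ("irmi", "ire"), ("irti", "ire")]:
--         if w.endswith(refl) and len(w) > len(refl) + 1:
--             return w[:-len(refl)] + base
--     return w
-- ===== SOURCE B (Python) =====
-- def normalize_reflexive(word):
--     """Normalizza verbi riflessivi: 'addolorarsi' -> 'addolorare', 'perdersi' -> 'perdere'.
--     Ritorna la forma base se e' un riflessivo, altrimenti la parola originale."""
--     w = word.lower()
--     # All 15 table entries have the shape <vowel>r<clitic>i with base <vowel>re:
--     # inspect the last four characters directly instead of scanning a table.
--     if len(w) > 5 and w[-1] == 'i' and w[-3] == 'r' and w[-4] in 'aei' and w[-2] in 'scvmt':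
--         return w[:-3] + 're'
--     return w
-- ===== Notes on version B (the rewrite author's own statement) =====
-- stated objective: simpler
-- what changed: Replaced the 15-entry suffix table and first-match loop by a single direct test of the last four characters (vowel, r, clitic consonant, final i), rebuilding the base by replacing the last three characters with the infinitive ending.
import Mathlib
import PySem

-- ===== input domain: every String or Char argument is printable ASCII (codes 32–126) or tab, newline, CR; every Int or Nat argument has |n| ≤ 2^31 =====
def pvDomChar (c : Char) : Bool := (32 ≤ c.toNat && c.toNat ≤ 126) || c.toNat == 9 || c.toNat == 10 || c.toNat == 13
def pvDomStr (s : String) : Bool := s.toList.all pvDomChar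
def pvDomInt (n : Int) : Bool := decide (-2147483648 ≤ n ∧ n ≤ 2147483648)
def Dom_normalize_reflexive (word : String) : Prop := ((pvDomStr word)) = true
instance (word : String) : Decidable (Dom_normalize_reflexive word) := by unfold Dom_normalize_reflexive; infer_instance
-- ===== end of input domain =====

-- B replaces A's 15-entry suffix table and first-match loop by one direct test of the
-- last four characters; objective: simpler.

-- ===== PORT A =====
-- A's literal suffix table, as char lists
def nrTable : List (List Char × List Char) :=
  [(['a','r','s','i'],['a','r','e']), (['e','r','s','i'],['e','r','e']), (['i','r','s','i'],['i','r','e']),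
   (['a','r','c','i'],['a','r','e']), (['a','r','v','i'],['a','r','e']), (['a','r','m','i'],['a','r','e']), (['a','r','t','i'],['a','r','e']),
   (['e','r','c','i'],['e','r','e']), (['e','r','v','i'],['e','r','e']), (['e','r','m','i'],['e','r','e']), (['e','r','t','i'],['e','r','e']),
   (['i','r','c','i'],['i','r','e']), (['i','r','v','i'],['i','r','e']), (['i','r','m','i'],['i','r','e']), (['i','r','t','i'],['i','r','e'])]

-- A's for-loop with early return: the first matching suffix wins, else return w
def nrLoop (w : List Char) : List (List Char × List Char) → List Char
  | [] => w
  | (refl, base) :: rest =>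
      if PySem.Chars.endswith w refl && decide (w.length > refl.length + 1) then
        PySem.Chars.slice w none (some (-(refl.length : Int))) ++ base
      else nrLoop w rest

def normalize_reflexive (word : String) : String :=
  String.ofList (nrLoop (PySem.Chars.lower word.toList) nrTable)

-- ===== PORT B =====
-- B's single test of the last four characters (w[-k] via pyGet?; the one-char
-- membership tests `w[-4] in 'aei'` / `w[-2] in 'scvmt'` are char membership — exact,
-- since a length-1 substring is in a string iff the char occurs in it)
def nrAlt (w : List Char) : List Char :=
  if decide (w.length > 5)
     && (PySem.List.pyGet? w (-1) == some 'i')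
     && (PySem.List.pyGet? w (-3) == some 'r')
     && (PySem.List.pyGet? w (-4)).any (fun c => c == 'a' || c == 'e' || c == 'i')
     && (PySem.List.pyGet? w (-2)).any (fun c => c == 's' || c == 'c' || c == 'v' || c == 'm' || c == 't')
  then PySem.Chars.slice w none (some (-3)) ++ ['r','e']
  else w

def normalize_reflexive_alt (word : String) : String :=
  String.ofList (nrAlt (PySem.Chars.lower word.toList))

-- ===== PRECONDITION & SPEC =====
def Spec_normalize_reflexive (word : String) (out : String) : Prop := out = normalize_reflexive_alt word
instance (word : String) (out : String) : Decidable (Spec_normalize_reflexive word out) := by unfold Spec_normalize_reflexive; infer_instance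

-- ===== CLAIM (what is proved, stated in full; the proofs are below) =====
def Claim_equal_normalize_reflexive : Prop := ∀ (word : String), Dom_normalize_reflexive word → Spec_normalize_reflexive word (normalize_reflexive word)

-- ===== LEMMAS AND PROOFS =====

-- short words: every guard `len(w) > 5` fails, both sides return w
theorem nrLoop_short (w : List Char) (h : ¬ w.length > 5) : nrLoop w nrTable = w := by
  simp [nrLoop, nrTable, h]

theorem nrAlt_short (w : List Char) (h : ¬ w.length > 5) : nrAlt w = w := by
  simp [nrAlt, h]

-- endswith against a length-4 suffix of ys ++ [c4,c3,c2,c1] is a 4-char comparison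
theorem nr_endswith (ys : List Char) (c4 c3 c2 c1 r4 r3 r2 r1 : Char) :
    PySem.Chars.endswith (ys ++ [c4,c3,c2,c1]) [r4,r3,r2,r1] =
      (c4 == r4 && c3 == r3 && c2 == r2 && c1 == r1) := by
  rw [Bool.eq_iff_iff, PySem.Chars.endswith_iff]
  constructor
  · intro hsuf
    obtain ⟨t, ht⟩ := hsuf
    have := (List.append_inj' ht (by simp)).2
    simp_all
  · intro hb
    simp at hb
    obtain ⟨⟨⟨h4,h3⟩,h2⟩,h1⟩ := hb
    subst h4 h3 h2 h1
    exact List.suffix_append ys _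

theorem nr_slice4 (ys : List Char) (c4 c3 c2 c1 : Char) :
    PySem.List.slice (ys ++ [c4,c3,c2,c1]) none (some (-4)) = ys := by
  rw [PySem.List.slice_to_neg_ofNat _ 4 (by omega)]
  simp

theorem nr_slice3 (ys : List Char) (c4 c3 c2 c1 : Char) :
    PySem.List.slice (ys ++ [c4,c3,c2,c1]) none (some (-3)) = ys ++ [c4] := by
  rw [PySem.List.slice_to_neg_ofNat _ 3 (by omega)]
  rw [show (ys ++ [c4,c3,c2,c1]).length - 3 = ys.length + 1 by simp]
  simp [List.take_append]

theorem nr_get1 (ys : List Char) (c4 c3 c2 c1 : Char) :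
    PySem.List.pyGet? (ys ++ [c4,c3,c2,c1]) (-1) = some c1 := by
  rw [PySem.List.pyGet?_neg_ofNat _ 1 (by omega) (by simp)]; simp

theorem nr_get2 (ys : List Char) (c4 c3 c2 c1 : Char) :
    PySem.List.pyGet? (ys ++ [c4,c3,c2,c1]) (-2) = some c2 := by
  rw [PySem.List.pyGet?_neg_ofNat _ 2 (by omega) (by simp)]
  rw [show (ys ++ [c4,c3,c2,c1]).length - 2 = ys.length + 2 by simp]
  simp

theorem nr_get3 (ys : List Char) (c4 c3 c2 c1 : Char) :
    PySem.List.pyGet? (ys ++ [c4,c3,c2,c1]) (-3) = some c3 := by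
  rw [PySem.List.pyGet?_neg_ofNat _ 3 (by omega) (by simp)]
  rw [show (ys ++ [c4,c3,c2,c1]).length - 3 = ys.length + 1 by simp]
  simp

theorem nr_get4 (ys : List Char) (c4 c3 c2 c1 : Char) :
    PySem.List.pyGet? (ys ++ [c4,c3,c2,c1]) (-4) = some c4 := by
  rw [PySem.List.pyGet?_neg_ofNat _ 4 (by omega) (by simp)]
  rw [show (ys ++ [c4,c3,c2,c1]).length - 4 = ys.length by simp]
  simp

-- long words: case analysis on the last four characters
set_option maxHeartbeats 1000000 in
theorem nrKey (ys : List Char) (c4 c3 c2 c1 : Char) (h : 2 ≤ ys.length) :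
    nrLoop (ys ++ [c4, c3, c2, c1]) nrTable = nrAlt (ys ++ [c4, c3, c2, c1]) := by
  have hg : decide ((ys ++ [c4,c3,c2,c1]).length > 4 + 1) = true := by simp; omega
  simp only [nrLoop, nrTable, nrAlt, nr_endswith,
    nr_get1, nr_get2, nr_get3, nr_get4, List.length_cons, List.length_nil,
    hg, Option.any_some, Bool.true_and]
  have hlt : 5 < ys.length + 4 := by omega
  by_cases h1 : c1 = 'i'
  case neg => simp [h1]
  subst h1
  by_cases h3 : c3 = 'r'
  case neg => simp [h3]
  subst h3
  by_cases h4a : c4 = 'a'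
  · subst h4a
    by_cases hs : c2 = 's'; · subst hs; simp [hlt, nr_slice4, nr_slice3]
    by_cases hc : c2 = 'c'; · subst hc; simp [hlt, nr_slice4, nr_slice3]
    by_cases hv : c2 = 'v'; · subst hv; simp [hlt, nr_slice4, nr_slice3]
    by_cases hm : c2 = 'm'; · subst hm; simp [hlt, nr_slice4, nr_slice3]
    by_cases ht : c2 = 't'; · subst ht; simp [hlt, nr_slice4, nr_slice3]
    simp [hs, hc, hv, hm, ht]
  by_cases h4e : c4 = 'e'
  · subst h4e
    by_cases hs : c2 = 's'; · subst hs; simp [hlt, nr_slice4, nr_slice3]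
    by_cases hc : c2 = 'c'; · subst hc; simp [hlt, nr_slice4, nr_slice3]
    by_cases hv : c2 = 'v'; · subst hv; simp [hlt, nr_slice4, nr_slice3]
    by_cases hm : c2 = 'm'; · subst hm; simp [hlt, nr_slice4, nr_slice3]
    by_cases ht : c2 = 't'; · subst ht; simp [hlt, nr_slice4, nr_slice3]
    simp [hs, hc, hv, hm, ht]
  by_cases h4i : c4 = 'i'
  · subst h4i
    by_cases hs : c2 = 's'; · subst hs; simp [hlt, nr_slice4, nr_slice3]
    by_cases hc : c2 = 'c'; · subst hc; simp [hlt, nr_slice4, nr_slice3]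
    by_cases hv : c2 = 'v'; · subst hv; simp [hlt, nr_slice4, nr_slice3]
    by_cases hm : c2 = 'm'; · subst hm; simp [hlt, nr_slice4, nr_slice3]
    by_cases ht : c2 = 't'; · subst ht; simp [hlt, nr_slice4, nr_slice3]
    simp [hs, hc, hv, hm, ht]
  simp [h4a, h4e, h4i]

theorem nr_eq (w : List Char) : nrLoop w nrTable = nrAlt w := by
  by_cases h : w.length > 5
  · have hw : w = w.take (w.length - 4) ++ w.drop (w.length - 4) := (List.take_append_drop _ _).symm
    have hl : (w.drop (w.length - 4)).length = 4 := by simp; omega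
    have ht : 2 ≤ (w.take (w.length - 4)).length := by simp; omega
    rcases hd : w.drop (w.length - 4) with _ | ⟨a, _ | ⟨b, _ | ⟨c, _ | ⟨d, _ | _⟩⟩⟩⟩ <;>
      simp [hd] at hl
    rw [hw, hd]
    exact nrKey _ a b c d ht
  · rw [nrLoop_short w h, nrAlt_short w h]

-- ===== VERDICT (by name: the statement is the Claim_ definition above) =====
theorem normalize_reflexive_spec : Claim_equal_normalize_reflexive := by
  intro word _
  unfold Spec_normalize_reflexive normalize_reflexive normalize_reflexive_alt
  rw [nr_eq]
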